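-- pv_equiv track=rewrite | github.com/antocreadev/Ateliers-L3SINF | 3/ex3.py | outputStr
-- ===== SOURCE A (Python) =====
-- def outputStr(mot: str, lpos: list) -> str:
--     """
--     Affiche le mot 'mot' en remplaçant les lettres aux positions spécifiées dans 'lpos' par des tirets (-).
--
--     :param mot: Le mot à afficher.
--     :type mot: str
--     :param lpos: Liste des positions (indices) des lettres à conserver.
--     :type lpos: list
--     """
--     longueur = len(mot)
--     result = ""
--     for i in range(longueur):
--         if i in lpos:
--             result += (mot[i])
--         else:
--             result += "-"
--     return result
-- ===== SOURCE B (Python) =====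
-- def outputStr(mot: str, lpos: list) -> str:
--     result = ['-'] * len(mot)
--     for p in lpos:
--         if 0 <= p < len(mot):
--             result[p] = mot[p]
--     return ''.join(result)
-- ===== Notes on version B (the rewrite author's own statement) =====
-- stated objective: faster
-- what changed: B scatters kept letters from lpos into a preallocated dash list and joins it, instead of scanning every word index and testing membership in lpos for each.
import Mathlib
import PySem

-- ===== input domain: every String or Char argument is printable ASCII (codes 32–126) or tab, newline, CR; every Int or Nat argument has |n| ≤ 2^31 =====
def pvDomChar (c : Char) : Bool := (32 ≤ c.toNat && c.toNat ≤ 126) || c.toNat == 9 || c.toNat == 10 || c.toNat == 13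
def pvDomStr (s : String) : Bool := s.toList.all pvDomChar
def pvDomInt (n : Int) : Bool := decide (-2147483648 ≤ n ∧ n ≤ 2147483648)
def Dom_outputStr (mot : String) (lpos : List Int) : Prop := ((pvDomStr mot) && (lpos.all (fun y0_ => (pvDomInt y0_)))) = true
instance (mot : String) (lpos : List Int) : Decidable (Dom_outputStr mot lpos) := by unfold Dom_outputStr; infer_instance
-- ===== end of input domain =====

-- B replaces A's per-index membership scan by scattering the kept letters from lpos
-- into a preallocated dash list (objective: faster, O(n+m) vs O(n*m)).

-- ===== PORT A =====
-- for i in range(len(mot)): result += mot[i] if i in lpos else "-"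
def outputStr (mot : String) (lpos : List Int) : String :=
  let cs := mot.toList
  let longueur := cs.length
  String.mk ((List.range longueur).foldl
    (fun result (i : Nat) => if (i : Int) ∈ lpos then result ++ [cs.getD i '-'] else result ++ ['-'])
    ([] : List Char))

-- ===== PORT B =====
-- result = ['-']*len(mot); for p in lpos: if 0 <= p < len(mot): result[p] = mot[p]
def outputStr_alt (mot : String) (lpos : List Int) : String :=
  let cs := mot.toList
  let n := cs.length
  String.mk (lpos.foldl
    (fun res p => if 0 ≤ p ∧ p < (n : Int) then res.set p.toNat (cs.getD p.toNat '-') else res)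
    (List.replicate n '-'))

-- ===== PRECONDITION & SPEC =====
def Spec_outputStr (mot : String) (lpos : List Int) (out : String) : Prop := out = outputStr_alt mot lpos
instance (mot : String) (lpos : List Int) (out : String) : Decidable (Spec_outputStr mot lpos out) := by unfold Spec_outputStr; infer_instance

-- ===== CLAIM (what is proved, stated in full; the proofs are below) =====
def Claim_equal_outputStr : Prop := ∀ (mot : String) (lpos : List Int), Dom_outputStr mot lpos → Spec_outputStr mot lpos (outputStr mot lpos)

-- ===== LEMMAS AND PROOFS =====

-- A's append-accumulating fold over the index range is the map of the per-index choice.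
theorem pvA_foldl_map (lpos : List Int) (cs : List Char) (l : List Nat) (acc : List Char) :
    l.foldl (fun result (i : Nat) => if (i : Int) ∈ lpos then result ++ [cs.getD i '-'] else result ++ ['-']) acc
      = acc ++ l.map (fun (i : Nat) => if (i : Int) ∈ lpos then cs.getD i '-' else '-') := by
  induction l generalizing acc with
  | nil => simp
  | cons a t ih => simp only [List.foldl_cons, List.map_cons]; rw [ih]; split_ifs <;> simp

-- B's scatter fold: length is preserved and entry i is cs[i] iff i occurs in lpos.
theorem pvB_scatter (cs : List Char) (lpos : List Int) (res : List Char)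
    (h : res.length = cs.length) :
    (lpos.foldl
      (fun res p => if 0 ≤ p ∧ p < (cs.length : Int) then res.set p.toNat (cs.getD p.toNat '-') else res)
      res).length = cs.length ∧
    ∀ i : Nat, i < cs.length →
      (lpos.foldl
        (fun res p => if 0 ≤ p ∧ p < (cs.length : Int) then res.set p.toNat (cs.getD p.toNat '-') else res)
        res).getD i '-' = if (i : Int) ∈ lpos then cs.getD i '-' else res.getD i '-' := by
  induction lpos generalizing res with
  | nil => exact ⟨h, fun i _ => by simp⟩
  | cons p t ih =>
    simp only [List.foldl]
    by_cases hp : 0 ≤ p ∧ p < (cs.length : Int)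
    · rw [if_pos hp]
      have hlen : (res.set p.toNat (cs.getD p.toNat '-')).length = cs.length := by simpa using h
      obtain ⟨hl, hi⟩ := ih _ hlen
      refine ⟨hl, fun i hin => ?_⟩
      rw [hi i hin]
      by_cases hit : (i : Int) ∈ t
      · rw [if_pos hit, if_pos (List.mem_cons_of_mem p hit)]
      · by_cases hpi : p = (i : Int)
        · have hpt : p.toNat = i := by omega
          have hset : (res.set p.toNat (cs.getD p.toNat '-')).getD i '-' = cs.getD i '-' := by
            subst hpt
            simp [List.getD, show p.toNat < res.length by omega]
          have hmem : (i : Int) ∈ p :: t := by simp [hpi]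
          rw [if_neg hit, if_pos hmem, hset]
        · have hne : p.toNat ≠ i := by omega
          have hset : (res.set p.toNat (cs.getD p.toNat '-')).getD i '-' = res.getD i '-' := by
            simp [List.getD, hne]
          have hmem : (i : Int) ∉ p :: t := by
            simp only [List.mem_cons]
            rintro (hh | hh)
            · exact hpi hh.symm
            · exact hit hh
          rw [if_neg hit, if_neg hmem, hset]
    · rw [if_neg hp]
      obtain ⟨hl, hi⟩ := ih _ h
      refine ⟨hl, fun i hin => ?_⟩
      rw [hi i hin]
      by_cases hit : (i : Int) ∈ t
      · rw [if_pos hit, if_pos (List.mem_cons_of_mem p hit)]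
      · have hpi : p ≠ (i : Int) := by
          rintro rfl
          exact hp ⟨Int.natCast_nonneg i, by exact_mod_cast hin⟩
        have hmem : (i : Int) ∉ p :: t := by
          simp only [List.mem_cons]
          rintro (hh | hh)
          · exact hpi hh.symm
          · exact hit hh
        rw [if_neg hit, if_neg hmem]

theorem pv_main (mot : String) (lpos : List Int) : outputStr mot lpos = outputStr_alt mot lpos := by
  unfold outputStr outputStr_alt
  dsimp only
  set cs := mot.toList with hcs
  obtain ⟨hl, hi⟩ := pvB_scatter cs lpos (List.replicate cs.length '-') (by simp)
  rw [pvA_foldl_map]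
  congr 1
  apply List.ext_getElem
  · simpa using hl.symm
  · intro i h1 h2
    have hic : i < cs.length := by simpa using h1
    have := hi i hic
    have hget : ∀ (l : List Char) (hL : i < l.length), l[i] = l.getD i '-' := by
      intro l hL; simp [List.getD, List.getElem?_eq_getElem hL]
    rw [hget _ h1, hget _ h2, this]
    by_cases hit : (i : Int) ∈ lpos <;> simp [hit, List.getD, hic]

-- ===== VERDICT (by name: the statement is the Claim_ definition above) =====
theorem outputStr_spec : Claim_equal_outputStr := by
  intro mot lpos _
  unfold Spec_outputStr
  exact pv_main mot lpos
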